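-- pv_equiv track=rewrite | github.com/op3ny/hsdcm | app.py | validate_contract_text_allowed
-- ===== SOURCE A (Python) =====
-- def validate_contract_text_allowed(contract_text, allowed_actions, username):
--     if not contract_text.startswith("# HSYST P2P SERVICE"):
--         return False, "Cabeçalho HSYST não encontrado"
--     if "## :END CONTRACT" not in contract_text:
--         return False, "Final do contrato não encontrado"
--     action = None
--     user = None
--     current_section = None
--     for line in contract_text.splitlines():
--         line = line.strip()
--         if line.startswith("### "):
--             if line.endswith(":"):
--                 current_section = line[4:-1].lower()
--         elif line.startswith("### :END "):
--             current_section = None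
--         elif line.startswith("# "):
--             if current_section == "details" and line.startswith("# ACTION:"):
--                 action = line.split(":", 1)[1].strip()
--             elif current_section == "start" and line.startswith("# USER:"):
--                 user = line.split(":", 1)[1].strip()
--     if not action:
--         return False, "Ação não informada no contrato"
--     if action not in allowed_actions:
--         return False, f"Ação inválida no contrato (permitido: {', '.join(allowed_actions)})"
--     if not user:
--         return False, "Usuário não informado no contrato"
--     if user != username:
--         return False, "Usuário do contrato não corresponde ao usuário informado"
--     return True, ""
-- ===== SOURCE B (Python) =====
-- def _tag(lines):
--     # group stripped lines under their section name
--     sec = None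
--     tagged = []
--     for raw in lines:
--         line = raw.strip()
--         if line.startswith("### ") and line.endswith(":"):
--             sec = line[4:-1].lower()
--         elif not line.startswith("### "):
--             tagged.append((sec, line))
--     return tagged
--
--
-- def _last_value(tagged, name, prefix):
--     # the LAST matching line wins: scan back to front, return the first hit
--     for sec, line in reversed(tagged):
--         if sec == name and line.startswith(prefix):
--             return line.split(":", 1)[1].strip()
--     return None
--
--
-- def validate_contract_text_allowed(contract_text, allowed_actions, username):
--     if not contract_text.startswith("# HSYST P2P SERVICE"):
--         return False, "Cabeçalho HSYST não encontrado"
--     if "## :END CONTRACT" not in contract_text: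
--         return False, "Final do contrato não encontrado"
--     tagged = _tag(contract_text.splitlines())
--     action = _last_value(tagged, "details", "# ACTION:")
--     user = _last_value(tagged, "start", "# USER:")
--     checks = [
--         (not action, "Ação não informada no contrato"),
--         (action not in allowed_actions,
--          f"Ação inválida no contrato (permitido: {', '.join(allowed_actions)})"),
--         (not user, "Usuário não informado no contrato"),
--         (user != username, "Usuário do contrato não corresponde ao usuário informado"),
--     ]
--     for failed, msg in checks:
--         if failed:
--             return False, msg
--     return True, ""
-- ===== Notes on version B (the rewrite author's own statement) =====
-- stated objective: alternative
-- what changed: Replaces A's single stateful loop by a staged decomposition: a grouping pass tags each non-header stripped line with its section, ACTION/USER are then each found by a backward first-match scan (= A's last assignment), and the validation tail becomes a data-driven first-failing-check table instead of an early-return if chain.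
import Mathlib
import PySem

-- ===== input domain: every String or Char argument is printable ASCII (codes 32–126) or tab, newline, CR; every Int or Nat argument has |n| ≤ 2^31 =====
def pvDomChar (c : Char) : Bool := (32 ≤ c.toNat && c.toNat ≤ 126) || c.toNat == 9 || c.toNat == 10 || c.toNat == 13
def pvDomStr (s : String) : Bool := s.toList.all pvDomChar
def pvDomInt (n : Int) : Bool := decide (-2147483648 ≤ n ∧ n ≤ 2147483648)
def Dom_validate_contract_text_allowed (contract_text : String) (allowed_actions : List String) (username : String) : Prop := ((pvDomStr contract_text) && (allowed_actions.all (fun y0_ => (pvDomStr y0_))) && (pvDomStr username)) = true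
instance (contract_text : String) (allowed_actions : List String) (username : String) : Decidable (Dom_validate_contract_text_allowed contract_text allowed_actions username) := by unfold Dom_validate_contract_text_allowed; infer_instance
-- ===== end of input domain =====

-- B replaces A's single stateful loop by a staged decomposition (group lines under their
-- section, extract ACTION/USER by a backward first-match scan, validate by a check table);
-- objective: alternative structure, same cost.

-- line.split(":", 1)[1] for a line that contains ':' (guarded by a startswith check in
-- both programs, so the match is exact on every reachable input)
def pvAfterColon (line : String) : String :=
  match PySem.Str.splitMax? line ":" 1 with
  | some (_ :: rest :: _) => rest
  | _ => ""

-- ===== PORT A =====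
-- loop state: (action, user, current_section)
def pvStepA (st : Option String × Option String × Option String) (raw : String) :
    Option String × Option String × Option String :=
  let line := PySem.Str.strip raw
  if PySem.Str.startswith line "### " then
    if PySem.Str.endswith line ":" then
      (st.1, st.2.1, some (PySem.Str.lower (PySem.Str.slice line (some 4) (some (-1)))))
    else st
  else if PySem.Str.startswith line "### :END " then (st.1, st.2.1, none)
  else if PySem.Str.startswith line "# " then
    if st.2.2 == some "details" && PySem.Str.startswith line "# ACTION:" then
      (some (PySem.Str.strip (pvAfterColon line)), st.2.1, st.2.2)
    else if st.2.2 == some "start" && PySem.Str.startswith line "# USER:" then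
      (st.1, some (PySem.Str.strip (pvAfterColon line)), st.2.2)
    else st
  else st

-- A's trailing early-return chain, transliterated
def pvTailA (action user : Option String) (allowed_actions : List String) (username : String) : Bool × String :=
  match action with
  | none => (false, "Ação não informada no contrato")
  | some act =>
    if act == "" then (false, "Ação não informada no contrato")
    else if !(allowed_actions.contains act) then
      (false, "Ação inválida no contrato (permitido: " ++ PySem.Str.join ", " allowed_actions ++ ")")
    else match user with
      | none => (false, "Usuário não informado no contrato")
      | some u =>
        if u == "" then (false, "Usuário não informado no contrato")
        else if u != username then (false, "Usuário do contrato não corresponde ao usuário informado")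
        else (true, "")

def validate_contract_text_allowed (contract_text : String) (allowed_actions : List String) (username : String) : Bool × String :=
  if !PySem.Str.startswith contract_text "# HSYST P2P SERVICE" then
    (false, "Cabeçalho HSYST não encontrado")
  else if !PySem.Str.isIn "## :END CONTRACT" contract_text then
    (false, "Final do contrato não encontrado")
  else
    pvTailA ((PySem.Str.splitlines contract_text).foldl pvStepA (none, none, none)).1
      ((PySem.Str.splitlines contract_text).foldl pvStepA (none, none, none)).2.1
      allowed_actions username

-- ===== PORT B =====
-- grouping pass: each retained stripped line tagged with its section
def pvTag : List String → Option String → List (Option String × String)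
  | [], _ => []
  | raw :: rest, sec =>
    let line := PySem.Str.strip raw
    if PySem.Str.startswith line "### " && PySem.Str.endswith line ":" then
      pvTag rest (some (PySem.Str.lower (PySem.Str.slice line (some 4) (some (-1)))))
    else if PySem.Str.startswith line "### " then pvTag rest sec
    else (sec, line) :: pvTag rest sec

-- backward scan (Source B iterates reversed(tagged)): first hit from the right
def pvLastValue : List (Option String × String) → String → String → Option String
  | [], _, _ => none
  | (sec, line) :: rest, name, pfx =>
    if sec == some name && PySem.Str.startswith line pfx then
      some (PySem.Str.strip (pvAfterColon line))
    else pvLastValue rest name pfx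

-- the check table's entries ('not action', 'action not in allowed_actions', 'user != username')
def pvFalsy : Option String → Bool
  | none => true
  | some s => s == ""

def pvNotIn (a : Option String) (xs : List String) : Bool :=
  match a with
  | none => true
  | some s => !(xs.contains s)

def pvNeq (u : Option String) (n : String) : Bool :=
  match u with
  | none => true
  | some s => s != n

-- return (False, msg) for the first failing check, else (True, "")
def pvFirstFail : List (Bool × String) → Bool × String
  | [] => (true, "")
  | (b, m) :: rest => if b then (false, m) else pvFirstFail rest

def validate_contract_text_allowed_alt (contract_text : String) (allowed_actions : List String) (username : String) : Bool × String :=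
  if !PySem.Str.startswith contract_text "# HSYST P2P SERVICE" then
    (false, "Cabeçalho HSYST não encontrado")
  else if !PySem.Str.isIn "## :END CONTRACT" contract_text then
    (false, "Final do contrato não encontrado")
  else
    pvFirstFail
      [ (pvFalsy (pvLastValue (pvTag (PySem.Str.splitlines contract_text) none).reverse "details" "# ACTION:"), "Ação não informada no contrato"),
        (pvNotIn (pvLastValue (pvTag (PySem.Str.splitlines contract_text) none).reverse "details" "# ACTION:") allowed_actions,
          "Ação inválida no contrato (permitido: " ++ PySem.Str.join ", " allowed_actions ++ ")"),
        (pvFalsy (pvLastValue (pvTag (PySem.Str.splitlines contract_text) none).reverse "start" "# USER:"), "Usuário não informado no contrato"),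
        (pvNeq (pvLastValue (pvTag (PySem.Str.splitlines contract_text) none).reverse "start" "# USER:") username, "Usuário do contrato não corresponde ao usuário informado") ]

-- ===== PRECONDITION & SPEC =====
def Spec_validate_contract_text_allowed (contract_text : String) (allowed_actions : List String) (username : String) (out : Bool × String) : Prop := out = validate_contract_text_allowed_alt contract_text allowed_actions username
instance (contract_text : String) (allowed_actions : List String) (username : String) (out : Bool × String) : Decidable (Spec_validate_contract_text_allowed contract_text allowed_actions username out) := by unfold Spec_validate_contract_text_allowed; infer_instance

-- ===== CLAIM (what is proved, stated in full; the proofs are below) =====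
def Claim_equal_validate_contract_text_allowed : Prop := ∀ (contract_text : String) (allowed_actions : List String) (username : String), Dom_validate_contract_text_allowed contract_text allowed_actions username → Spec_validate_contract_text_allowed contract_text allowed_actions username (validate_contract_text_allowed contract_text allowed_actions username)

-- ===== LEMMAS AND PROOFS =====

-- a string starting with q also starts with any pfx p of q
theorem pvStartsMono (s p q : String) (hpq : p.toList <+: q.toList)
    (h : PySem.Str.startswith s q = true) : PySem.Str.startswith s p = true := by
  simp only [PySem.Str.startswith_eq, PySem.Chars.startswith_iff] at h ⊢
  exact hpq.trans h

theorem pvLastValue_append (l1 l2 : List (Option String × String)) (n p : String) :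
    pvLastValue (l1 ++ l2) n p = Option.or (pvLastValue l1 n p) (pvLastValue l2 n p) := by
  induction l1 with
  | nil => simp [pvLastValue]
  | cons hd tl ih =>
    obtain ⟨sec, line⟩ := hd
    simp only [List.cons_append, pvLastValue]
    split_ifs with h
    · rfl
    · exact ih

theorem pvOrAbsorb (x : Option String) (v : String) (a : Option String) :
    Option.or (Option.or x (some v)) a = Option.or x (some v) := by cases x <;> rfl

theorem pvOrNoneMid (x a : Option String) :
    Option.or (Option.or x none) a = Option.or x a := by cases x <;> rfl

-- A's fold's action/user = B's backward scans over the tagged lines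
theorem pvFold_eq (lines : List String) (sec a u : Option String) :
    (lines.foldl pvStepA (a, u, sec)).1
      = Option.or (pvLastValue (pvTag lines sec).reverse "details" "# ACTION:") a ∧
    (lines.foldl pvStepA (a, u, sec)).2.1
      = Option.or (pvLastValue (pvTag lines sec).reverse "start" "# USER:") u := by
  induction lines generalizing sec a u with
  | nil => simp [pvTag, pvLastValue]
  | cons raw rest ih =>
    simp only [List.foldl_cons, pvStepA, pvTag]
    cases hS : PySem.Str.startswith (PySem.Str.strip raw) "### " with
    | true =>
      cases hE : PySem.Str.endswith (PySem.Str.strip raw) ":" with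
      | true => simp only [Bool.and_self, if_true]; exact ih _ _ _
      | false =>
        simp only [Bool.and_false, Bool.false_eq_true, if_false, if_true]
        exact ih _ _ _
    | false =>
      have hend : PySem.Str.startswith (PySem.Str.strip raw) "### :END " = false := by
        cases hq : PySem.Str.startswith (PySem.Str.strip raw) "### :END "
        · rfl
        · have := pvStartsMono (PySem.Str.strip raw) "### " "### :END " (by decide) hq
          rw [hS] at this; exact this.symm
      simp only [hend, Bool.false_and, Bool.false_eq_true, if_false,
        List.reverse_cons, pvLastValue_append, pvLastValue]
      cases h3 : PySem.Str.startswith (PySem.Str.strip raw) "# " with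
      | false =>
        have hA : (sec == some "details" && PySem.Str.startswith (PySem.Str.strip raw) "# ACTION:") = false := by
          cases hq : PySem.Str.startswith (PySem.Str.strip raw) "# ACTION:"
          · simp
          · have := pvStartsMono (PySem.Str.strip raw) "# " "# ACTION:" (by decide) hq
            rw [h3] at this; exact absurd this (by simp)
        have hU : (sec == some "start" && PySem.Str.startswith (PySem.Str.strip raw) "# USER:") = false := by
          cases hq : PySem.Str.startswith (PySem.Str.strip raw) "# USER:"
          · simp
          · have := pvStartsMono (PySem.Str.strip raw) "# " "# USER:" (by decide) hq
            rw [h3] at this; exact absurd this (by simp)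
        simp only [hA, hU, Bool.false_eq_true, if_false]
        rw [pvOrNoneMid, pvOrNoneMid]
        exact ih _ _ _
      | true =>
        simp only [if_true]
        cases hA : (sec == some "details" && PySem.Str.startswith (PySem.Str.strip raw) "# ACTION:") with
        | true =>
          have hsec : sec = some "details" := by
            rw [Bool.and_eq_true] at hA
            exact eq_of_beq hA.1
          have hU : (sec == some "start" && PySem.Str.startswith (PySem.Str.strip raw) "# USER:") = false := by
            subst hsec; simp
          simp only [hU, Bool.false_eq_true, if_true, if_false]
          rw [pvOrAbsorb, pvOrNoneMid]
          exact ih _ _ _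
        | false =>
          cases hU : (sec == some "start" && PySem.Str.startswith (PySem.Str.strip raw) "# USER:") with
          | true =>
            simp only [Bool.false_eq_true, if_true, if_false]
            rw [pvOrNoneMid, pvOrAbsorb]
            exact ih _ _ _
          | false =>
            simp only [Bool.false_eq_true, if_false]
            rw [pvOrNoneMid, pvOrNoneMid]
            exact ih _ _ _

theorem pvOrNoneRight (x : Option String) : Option.or x none = x := by cases x <;> rfl

-- A's early-return chain = B's first-failing-check table
theorem pvTail_eq (a u : Option String) (al : List String) (un : String) :
    pvTailA a u al un
      = pvFirstFail
          [ (pvFalsy a, "Ação não informada no contrato"),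
            (pvNotIn a al,
              "Ação inválida no contrato (permitido: " ++ PySem.Str.join ", " al ++ ")"),
            (pvFalsy u, "Usuário não informado no contrato"),
            (pvNeq u un, "Usuário do contrato não corresponde ao usuário informado") ] := by
  cases a with
  | none => rfl
  | some act =>
    cases u with
    | none =>
      simp only [pvTailA, pvFirstFail, pvFalsy, pvNotIn, pvNeq]
      cases h1 : act == "" <;> cases h2 : al.contains act <;> simp
    | some us =>
      simp only [pvTailA, pvFirstFail, pvFalsy, pvNotIn, pvNeq]

-- ===== VERDICT (by name: the statement is the Claim_ definition above) =====
theorem validate_contract_text_allowed_spec : Claim_equal_validate_contract_text_allowed := by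
  intro contract_text allowed_actions username _
  unfold Spec_validate_contract_text_allowed validate_contract_text_allowed validate_contract_text_allowed_alt
  split_ifs with h1 h2
  · rfl
  · rfl
  · have h := pvFold_eq (PySem.Str.splitlines contract_text) none none none
    rw [h.1.trans (pvOrNoneRight _), h.2.trans (pvOrNoneRight _)]
    exact pvTail_eq _ _ _ _
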